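-- pv_equiv track=rewrite | github.com/Aryudesu/ABC | ABC/197/ABC197C.py | bit_all_search
-- ===== SOURCE A (Python) =====
-- def calc(N, A, data):
--     result1 = 0
--     result2 = 0
--     for idx in range(N):
--         if idx in data:
--             result1 |= A[idx]
--         else:
--             result2 |= A[idx]
--     return result1 ^ result2
--
-- def bit_all_search(A, M):
--     """
--     ビット全探索を行います
--     A: 探索用配列
--     M: 何個の要素で探索を行うか
--     それ以降: 条件確認に用いるやつ
--     """
--     result = 10**100
--     for a in range(1 << M):
--         data = []
--         tmp = a
--         count = 0
--         # Bit全探索用に配列作成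
--         while tmp:
--             if tmp & 1:
--                 data.append(count)
--             count += 1
--             tmp >>= 1
--         # 条件を満たす場合の処理
--         c = calc(M, A, data)
--         if result > c:
--             result = c
--     return result
-- ===== SOURCE B (Python) =====
-- def bit_all_search(A, M):
--     # Branch-recursion over the positions: each element goes into the left OR or
--     # the right OR, accumulating both ORs along the way; min over the 2^M leaves.
--     # O(2^M) total work instead of A's O(2^M * M * popcount) mask decoding.
--     def rec(i, or1, or2):
--         if i == M:
--             return or1 ^ or2
--         a = A[i]
--         return min(rec(i + 1, or1 | a, or2), rec(i + 1, or1, or2 | a))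
--     return rec(0, 0, 0)
-- ===== Notes on version B (the rewrite author's own statement) =====
-- stated objective: faster
-- what changed: Replaced the mask enumeration (decode each mask into a list of set-bit positions, then rescan all M positions with a list-membership test per index) by a binary branch recursion over positions that carries the two OR accumulators, so no mask decoding or membership scan exists; intended as faster (O(2^M) vs O(2^M*M^2) total work; measured 9.12x at the largest size both finished, both remain exponential overall).
import Mathlib
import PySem

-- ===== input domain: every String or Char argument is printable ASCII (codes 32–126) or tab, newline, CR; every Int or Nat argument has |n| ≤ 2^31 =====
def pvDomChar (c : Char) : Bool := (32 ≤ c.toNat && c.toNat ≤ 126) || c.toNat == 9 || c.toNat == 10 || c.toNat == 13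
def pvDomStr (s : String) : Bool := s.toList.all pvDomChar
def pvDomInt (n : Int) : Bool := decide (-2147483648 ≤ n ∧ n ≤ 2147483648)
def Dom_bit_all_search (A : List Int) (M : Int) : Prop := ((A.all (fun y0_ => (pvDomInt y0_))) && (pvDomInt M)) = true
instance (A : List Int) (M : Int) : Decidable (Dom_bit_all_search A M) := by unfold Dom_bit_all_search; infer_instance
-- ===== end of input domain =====

-- B replaces A's per-mask decoding (set-bit list + membership rescan) by a binary branch
-- recursion over positions carrying both OR accumulators; intended as faster (measured 9.12x
-- at the largest size both finished; both remain exponential in M overall).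

-- ===== PORT A =====
-- the 'while tmp: … tmp >>= 1' loop of A; tmp is taken as a Nat (exact: every mask a
-- produced by range(1 << M) is nonnegative)
def pvCollect (tmp : Nat) (count : Int) : List Int :=
  if _h : tmp = 0 then []
  else (if tmp % 2 = 1 then [count] else []) ++ pvCollect (tmp / 2) (count + 1)
decreasing_by exact Nat.div_lt_self (Nat.pos_of_ne_zero _h) one_lt_two

-- A's helper calc; A[idx] is ported with pyGetD (exact inside Pre_, where 0 ≤ idx < len A)
def pvCalc (N : Int) (A : List Int) (data : List Int) : Int :=
  let p := (PySem.List.pyRange 0 N 1).foldl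
    (fun (p : Int × Int) idx =>
      if idx ∈ data then (PySem.Int.bor p.1 (PySem.List.pyGetD A idx 0), p.2)
      else (p.1, PySem.Int.bor p.2 (PySem.List.pyGetD A idx 0))) (0, 0)
  PySem.Int.bxor p.1 p.2

-- '1 << M' is ported as (1 : Int) <<< M.toNat (exact for 0 ≤ M; Python raises for M < 0,
-- which Pre_ excludes); 'a.toNat' is exact since every a in the range is nonnegative
def bit_all_search (A : List Int) (M : Int) : Int :=
  (PySem.List.pyRange 0 ((1 : Int) <<< M.toNat) 1).foldl
    (fun result a =>
      let data := pvCollect a.toNat 0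
      let c := pvCalc M A data
      if result > c then c else result) (10 ^ 100)

-- ===== PORT B =====
-- Source B's rec(i, or1, or2); the 'else 0' arm is a totality guard only: Python's rec never
-- terminates when i > M, and Pre_ guarantees the start i = 0 satisfies 0 ≤ M
def pvRec (A : List Int) (M : Int) (i : Int) (or1 or2 : Int) : Int :=
  if i = M then PySem.Int.bxor or1 or2
  else if _h : i < M then
    let a := PySem.List.pyGetD A i 0
    min (pvRec A M (i + 1) (PySem.Int.bor or1 a) or2)
        (pvRec A M (i + 1) or1 (PySem.Int.bor or2 a))
  else 0
termination_by (M - i).toNat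
decreasing_by all_goals omega

def bit_all_search_alt (A : List Int) (M : Int) : Int := pvRec A M 0 0 0

-- ===== PRECONDITION & SPEC =====
-- exactly where A returns: M < 0 makes '1 << M' raise ValueError, and M > len(A) makes
-- 'A[idx]' raise IndexError inside calc
def Pre_bit_all_search (A : List Int) (M : Int) : Prop := 0 ≤ M ∧ M ≤ A.length
instance (A : List Int) (M : Int) : Decidable (Pre_bit_all_search A M) := by
  unfold Pre_bit_all_search; infer_instance

def pvWitness_bit_all_search : List Int × Int := ([1, 2, 3], 2)

def Spec_bit_all_search (A : List Int) (M : Int) (out : Int) : Prop := out = bit_all_search_alt A M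
instance (A : List Int) (M : Int) (out : Int) : Decidable (Spec_bit_all_search A M out) := by
  unfold Spec_bit_all_search; infer_instance

-- ===== CLAIM (what is proved, stated in full; the proofs are below) =====
def Claim_equal_bit_all_search : Prop := ∀ (A : List Int) (M : Int), Dom_bit_all_search A M → Pre_bit_all_search A M → Spec_bit_all_search A M (bit_all_search A M)

-- ===== LEMMAS AND PROOFS =====

-- the value of one mask: walk the list, routing each element into or1 (bit = 1) or or2
def vPair : List Int → Int × Int → Nat → Int × Int
  | [], p, _ => p
  | a :: l, p, mask =>
    if mask % 2 = 1 then vPair l (PySem.Int.bor p.1 a, p.2) (mask / 2)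
    else vPair l (p.1, PySem.Int.bor p.2 a) (mask / 2)

def vFold (l : List Int) (or1 or2 : Int) (mask : Nat) : Int :=
  PySem.Int.bxor (vPair l (or1, or2) mask).1 (vPair l (or1, or2) mask).2

-- B's recursion as a min-tree on the element list
def mtree : List Int → Int → Int → Int
  | [], or1, or2 => PySem.Int.bxor or1 or2
  | a :: l, or1, or2 =>
    min (mtree l (PySem.Int.bor or1 a) or2) (mtree l or1 (PySem.Int.bor or2 a))

-- min-fold of f over range c starting from init
def minF (init : Int) (f : Nat → Int) (c : Nat) : Int :=
  (List.range c).foldl (fun r m => min r (f m)) init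

theorem mem_pvCollect (tmp : Nat) : ∀ (count x : Int),
    x ∈ pvCollect tmp count ↔ ∃ j : Nat, tmp.testBit j = true ∧ x = count + j := by
  induction tmp using Nat.strong_induction_on with
  | _ tmp ih =>
    intro count x
    rw [pvCollect]
    by_cases h0 : tmp = 0
    · simp [h0]
    · simp only [h0, dif_neg, not_false_iff, List.mem_append,
        ih (tmp / 2) (Nat.div_lt_self (Nat.pos_of_ne_zero h0) one_lt_two)]
      constructor
      · rintro (hx | ⟨j, hj, rfl⟩)
        · by_cases hp : tmp % 2 = 1
          · simp [hp] at hx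
            exact ⟨0, by simp [Nat.testBit_zero, hp], by omega⟩
          · simp [hp] at hx
        · exact ⟨j + 1, by rw [Nat.testBit_add_one]; exact hj, by push_cast; ring⟩
      · rintro ⟨j, hj, rfl⟩
        cases j with
        | zero =>
          rw [Nat.testBit_zero] at hj
          simp at hj
          simp [hj]
        | succ j =>
          rw [Nat.testBit_add_one] at hj
          right
          exact ⟨j, hj, by push_cast; ring⟩
theorem mem_pvCollect_zero (mask : Nat) (idx : Nat) :
    ((idx : Int) ∈ pvCollect mask 0) ↔ mask.testBit idx = true := by
  rw [mem_pvCollect]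
  constructor
  · rintro ⟨j, hj, he⟩
    have : idx = j := by exact_mod_cast (by omega : (idx : Int) = j)
    rwa [this]
  · intro h; exact ⟨idx, h, by omega⟩

theorem loop_eq_vPair (A : List Int) (mask : Nat) : ∀ (k s : Nat) (p : Int × Int),
    s + k ≤ A.length →
    (List.range' s k).foldl
      (fun (p : Int × Int) (idx : Nat) =>
        if (idx : Int) ∈ pvCollect mask 0 then (PySem.Int.bor p.1 (PySem.List.pyGetD A idx 0), p.2)
        else (p.1, PySem.Int.bor p.2 (PySem.List.pyGetD A idx 0))) p
    = vPair ((A.drop s).take k) p (mask >>> s) := by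
  intro k
  induction k with
  | zero => intro s p h; simp [vPair]
  | succ k ih =>
    intro s p h
    have hs : s < A.length := by omega
    rw [List.range'_succ, List.foldl_cons]
    rw [List.drop_eq_getElem_cons hs, List.take_succ_cons]
    have hget : PySem.List.pyGetD A (s : Int) 0 = A[s] := by
      simp [PySem.List.pyGetD_natCast, List.getD_eq_getElem?_getD, hs]
    have hbit : ((s : Int) ∈ pvCollect mask 0) ↔ mask.testBit s = true := mem_pvCollect_zero mask s
    have hshift : mask >>> s / 2 = mask >>> (s + 1) := (Nat.shiftRight_succ mask s).symm
    have hmod : (mask >>> s % 2 = 1) ↔ mask.testBit s = true := by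
      rw [Nat.testBit, Nat.one_and_eq_mod_two]; simp
    by_cases hb : mask.testBit s = true
    · rw [if_pos (hbit.mpr hb), hget]
      simp only [vPair]
      rw [if_pos (hmod.mpr hb), hshift]
      exact ih (s + 1) _ (by omega)
    · rw [if_neg (fun hc => hb (hbit.mp hc)), hget]
      simp only [vPair]
      rw [if_neg (fun hc => hb (hmod.mp hc)), hshift]
      exact ih (s + 1) _ (by omega)
theorem calc_eq_vFold (A : List Int) (n : Nat) (h : n ≤ A.length) (mask : Nat) :
    pvCalc (n : Int) A (pvCollect mask 0) = vFold (A.take n) 0 0 mask := by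
  unfold pvCalc vFold
  rw [PySem.List.pyRange_one]
  have h1 : ((n : Int) - 0).toNat = n := by omega
  rw [h1, List.foldl_map, List.range_eq_range']
  have := loop_eq_vPair A mask n 0 (0, 0) (by omega)
  simp only [zero_add, List.drop_zero, Nat.shiftRight_zero] at this ⊢
  rw [this]
theorem range_two_pow_perm (k : Nat) :
    (List.range (2 ^ (k + 1))).Perm
      ((List.range (2 ^ k)).map (fun m => 2 * m) ++ (List.range (2 ^ k)).map (fun m => 2 * m + 1)) := by
  apply List.perm_of_nodup_nodup_toFinset_eq (List.nodup_range) _ _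
  · refine List.Nodup.append ?_ ?_ ?_
    · exact (List.nodup_range).map (fun a b hab => by omega)
    · exact (List.nodup_range).map (fun a b hab => by omega)
    · intro x hx hy
      simp only [List.mem_map, List.mem_range] at hx hy
      obtain ⟨a, _, ha⟩ := hx; obtain ⟨b, _, hb⟩ := hy; omega
  · ext x
    simp only [List.mem_toFinset, List.mem_range, List.mem_append, List.mem_map, List.mem_range]
    constructor
    · intro hx
      rcases Nat.even_or_odd x with he | ho
      · exact Or.inl ⟨x / 2, by omega, by obtain ⟨c, hc⟩ := he; omega⟩
      · exact Or.inr ⟨x / 2, by omega, by obtain ⟨c, hc⟩ := ho; omega⟩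
    · rintro (⟨m, hm, rfl⟩ | ⟨m, hm, rfl⟩) <;> omega

theorem foldl_min_rcomm (f : Nat → Int) (l1 l2 : List Nat) (p : l1.Perm l2) (init : Int) :
    l1.foldl (fun r m => min r (f m)) init = l2.foldl (fun r m => min r (f m)) init :=
  List.Perm.foldl_eq' p (fun x _ y _ z => by
    simp only [min_assoc]; rw [min_comm (f x) (f y)]) init

theorem minF_eq_min_mtree : ∀ (l : List Int) (or1 or2 init : Int),
    minF init (vFold l or1 or2) (2 ^ l.length) = min init (mtree l or1 or2) := by
  intro l
  induction l with
  | nil =>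
    intro or1 or2 init
    simp [minF, mtree, vFold, vPair]
  | cons a l ih =>
    intro or1 or2 init
    unfold minF
    rw [List.length_cons]
    rw [foldl_min_rcomm _ _ _ (range_two_pow_perm l.length) init, List.foldl_append,
      List.foldl_map, List.foldl_map]
    have heven : ∀ (m : Nat), vFold (a :: l) or1 or2 (2 * m) = vFold l or1 (PySem.Int.bor or2 a) m := by
      intro m
      unfold vFold
      simp only [vPair]
      rw [if_neg (by omega), (by omega : 2 * m / 2 = m)]
    have hodd : ∀ (m : Nat), vFold (a :: l) or1 or2 (2 * m + 1) = vFold l (PySem.Int.bor or1 a) or2 m := by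
      intro m
      unfold vFold
      simp only [vPair]
      rw [if_pos (by omega), (by omega : (2 * m + 1) / 2 = m)]
    simp only [heven, hodd]
    have e1 : (List.range (2 ^ l.length)).foldl (fun r m => min r (vFold l or1 (PySem.Int.bor or2 a) m)) init
        = min init (mtree l or1 (PySem.Int.bor or2 a)) := ih or1 (PySem.Int.bor or2 a) init
    have e2 := ih (PySem.Int.bor or1 a) or2 (min init (mtree l or1 (PySem.Int.bor or2 a)))
    unfold minF at e1 e2
    rw [e1, e2]
    show _ = min init (mtree (a :: l) or1 or2)
    simp only [mtree]
    rw [min_comm (mtree l (PySem.Int.bor or1 a) or2), min_assoc]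
theorem pvRec_eq_mtree (A : List Int) (M : Int) : ∀ (k : Nat) (i : Int) (or1 or2 : Int),
    0 ≤ i → i ≤ M → M ≤ (A.length : Int) → (M - i).toNat = k →
    pvRec A M i or1 or2 = mtree ((A.take M.toNat).drop i.toNat) or1 or2 := by
  intro k
  induction k with
  | zero =>
    intro i or1 or2 h0 h1 h2 hk
    have : i = M := by omega
    rw [pvRec, if_pos this]
    have hlen : ((A.take M.toNat).drop i.toNat) = [] := by
      apply List.drop_eq_nil_of_le
      rw [List.length_take]
      omega
    rw [hlen, mtree]
  | succ k ih =>
    intro i or1 or2 h0 h1 h2 hk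
    have hi : i < M := by omega
    rw [pvRec, if_neg (by omega), dif_pos hi]
    have hlt : i.toNat < (A.take M.toNat).length := by
      rw [List.length_take]; omega
    rw [List.drop_eq_getElem_cons hlt]
    simp only [mtree]
    have hget : PySem.List.pyGetD A i 0 = (A.take M.toNat)[i.toNat] := by
      rw [List.getElem_take]
      exact PySem.List.pyGetD_eq_getElem A 0 h0 (by omega)
    rw [hget]
    have e1 := ih (i + 1) (PySem.Int.bor or1 (A.take M.toNat)[i.toNat]) or2 (by omega) (by omega) h2 (by omega)
    have e2 := ih (i + 1) or1 (PySem.Int.bor or2 (A.take M.toNat)[i.toNat]) (by omega) (by omega) h2 (by omega)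
    rw [e1, e2]
    have : (i + 1).toNat = i.toNat + 1 := by omega
    rw [this]

theorem mtree_le (l : List Int) : ∀ (or1 or2 : Int), mtree l or1 or2 ≤ vFold l or1 or2 0 := by
  induction l with
  | nil => intro or1 or2; simp [mtree, vFold, vPair]
  | cons a l ih =>
    intro or1 or2
    simp only [mtree, vFold, vPair]
    rw [if_neg (by omega)]
    exact le_trans (min_le_right _ _) (ih or1 (PySem.Int.bor or2 a))

theorem bor_lt (x y : Int) (hx : x < 2 ^ 32) (hy : y < 2 ^ 32) : PySem.Int.bor x y < 2 ^ 32 := by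
  unfold PySem.Int.bor
  split_ifs with h1 h2 h2
  · have hx' : x.toNat < 2 ^ 32 := by omega
    have hy' : y.toNat < 2 ^ 32 := by omega
    have := Nat.or_lt_two_pow hx' hy'
    omega
  · omega
  · omega
  · omega

theorem vFold_zero_lt (l : List Int) : ∀ (or2 : Int),
    (∀ a ∈ l, a < 2 ^ 32) → or2 < 2 ^ 32 → vFold l 0 or2 0 < 2 ^ 32 := by
  induction l with
  | nil =>
    intro or2 _ h2
    simp only [vFold, vPair]
    rw [PySem.Int.bxor_comm, PySem.Int.bxor_zero]
    exact h2
  | cons a l ih =>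
    intro or2 hall h2
    simp only [vFold, vPair]
    rw [if_neg (by omega)]
    exact ih (PySem.Int.bor or2 a) (fun b hb => hall b (List.mem_cons_of_mem a hb))
      (bor_lt _ _ h2 (hall a List.mem_cons_self))
theorem main_eq (A : List Int) (M : Int)
    (hd : ∀ a ∈ A, a < 2 ^ 32) (h0 : 0 ≤ M) (h1 : M ≤ (A.length : Int)) :
    bit_all_search A M = pvRec A M 0 0 0 := by
  set n := M.toNat with hn
  have hM : M = (n : Int) := by omega
  have hnlen : n ≤ A.length := by omega
  unfold bit_all_search
  rw [(by rw [Int.shiftLeft_eq]; push_cast; ring : (1 : Int) <<< M.toNat = ((2 ^ n : Nat) : Int)),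
    PySem.List.pyRange_one]
  have h2 : (((2 ^ n : Nat) : Int) - 0).toNat = 2 ^ n := by rw [sub_zero, Int.toNat_natCast]
  rw [h2, List.foldl_map]
  have hfun : (fun (result : Int) (k : Nat) =>
      let data := pvCollect ((0 : Int) + (k : Int)).toNat 0
      let c := pvCalc M A data
      if result > c then c else result)
      = fun (r : Int) (m : Nat) => min r (vFold (A.take n) 0 0 m) := by
    funext r m
    simp only [zero_add, Int.toNat_natCast]
    rw [hM, calc_eq_vFold A n hnlen m]
    rw [min_def]
    split_ifs <;> omega
  rw [hfun]
  have hminF : (List.range (2 ^ n)).foldl (fun r m => min r (vFold (A.take n) 0 0 m)) (10 ^ 100)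
      = min (10 ^ 100) (mtree (A.take n) 0 0) := by
    have := minF_eq_min_mtree (A.take n) 0 0 (10 ^ 100)
    rw [List.length_take, min_eq_left hnlen] at this
    exact this
  rw [hminF]
  have hb : mtree (A.take n) 0 0 < 2 ^ 32 :=
    lt_of_le_of_lt (mtree_le (A.take n) 0 0)
      (vFold_zero_lt (A.take n) 0 (fun a ha => hd a (List.mem_of_mem_take ha)) (by omega))
  rw [min_eq_right (by omega : mtree (A.take n) 0 0 ≤ 10 ^ 100)]
  rw [pvRec_eq_mtree A M (M - 0).toNat 0 0 0 le_rfl h0 h1 rfl]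
  simp [← hn]

-- ===== VERDICT (by name: the statement is the Claim_ definition above) =====
theorem bit_all_search_spec : Claim_equal_bit_all_search := by
  intro A M hdom hpre
  obtain hd : ∀ a ∈ A, a < 2 ^ 32 := by
    unfold Dom_bit_all_search at hdom
    simp only [Bool.and_eq_true, List.all_eq_true, pvDomInt, decide_eq_true_eq] at hdom
    intro a ha
    have := hdom.1 a ha
    omega
  obtain ⟨h0, h1⟩ := hpre
  unfold Spec_bit_all_search bit_all_search_alt
  exact main_eq A M hd h0 h1
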